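-- pv_equiv track=rewrite | github.com/XinnuoXu/AdventofCode | 2020/day_16.py | quiz_one
-- ===== SOURCE A (Python) =====
-- def quiz_one(rules, nearby_tickets):
--     qualified_numbers = set()
--     for field in rules:
--         rule = rules[field]
--         qualified_numbers |= set(range(rule[0], rule[1]+1)) | set(range(rule[2], rule[3]+1))
--     err_rate = 0; qualified_tickes = []
--     for ticket in nearby_tickets:
--         qualified = True
--         for number in ticket:
--             if number not in qualified_numbers:
--                 err_rate += number
--                 qualified = False
--         if qualified:
--             qualified_tickes.append(ticket)
--     return err_rate, qualified_tickes
-- ===== SOURCE B (Python) =====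
-- def quiz_one(rules, nearby_tickets):
--     # Keep the rules as half-open intervals, sort by start and merge them once,
--     # then test each ticket number by binary search over the merged intervals.
--     ivs = []
--     for rule in rules.values():
--         ivs.append((rule[0], rule[1] + 1))
--         ivs.append((rule[2], rule[3] + 1))
--     ivs.sort(key=lambda iv: iv[0])
--     merged = []
--     for a, b in ivs:
--         if a >= b:
--             continue
--         if merged and a <= merged[-1][1]:
--             if b > merged[-1][1]:
--                 merged[-1] = (merged[-1][0], b)
--         else:
--             merged.append((a, b))
--     starts = [iv[0] for iv in merged]
--
--     def ok(n):
--         lo, hi = 0, len(starts)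
--         while lo < hi:
--             mid = (lo + hi) // 2
--             if starts[mid] <= n:
--                 lo = mid + 1
--             else:
--                 hi = mid
--         return lo > 0 and n < merged[lo - 1][1]
--
--     err_rate = 0
--     qualified = []
--     for ticket in nearby_tickets:
--         bad = [n for n in ticket if not ok(n)]
--         err_rate += sum(bad)
--         if not bad:
--             qualified.append(ticket)
--     return err_rate, qualified
-- ===== Notes on version B (the rewrite author's own statement) =====
-- stated objective: faster
-- what changed: B never materializes the rule ranges: it turns each rule into two half-open intervals, sorts and merges them once into disjoint intervals, and validates each ticket number by binary search over the merged interval starts instead of looking it up in a set built by expanding every range.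
import Mathlib
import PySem

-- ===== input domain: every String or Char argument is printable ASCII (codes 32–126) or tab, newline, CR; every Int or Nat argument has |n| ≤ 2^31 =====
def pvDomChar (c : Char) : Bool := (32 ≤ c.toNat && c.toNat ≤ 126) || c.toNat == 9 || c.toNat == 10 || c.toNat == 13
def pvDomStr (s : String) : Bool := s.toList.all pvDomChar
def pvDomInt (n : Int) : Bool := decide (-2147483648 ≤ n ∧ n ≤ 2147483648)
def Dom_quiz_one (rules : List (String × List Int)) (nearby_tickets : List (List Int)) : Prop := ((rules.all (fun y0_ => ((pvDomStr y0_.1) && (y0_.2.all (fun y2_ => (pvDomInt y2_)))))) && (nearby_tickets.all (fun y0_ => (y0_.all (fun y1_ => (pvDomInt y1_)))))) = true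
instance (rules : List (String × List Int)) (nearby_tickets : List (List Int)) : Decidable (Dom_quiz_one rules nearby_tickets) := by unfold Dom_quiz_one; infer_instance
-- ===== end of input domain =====

-- B never expands a rule range into a set of numbers: it merges the rules into sorted
-- disjoint half-open intervals once and tests each ticket number by binary search
-- (objective: faster).

-- ===== PORT A =====
-- the 'for field in rules: rule = rules[field]; qualified_numbers |= set(range(...)) | set(range(...))' loop
def pvAqualifiedNumbers (rules : List (String × List Int)) : PySem.Set Int :=
  (PySem.Dict.ofList rules).items.foldl
    (fun s p =>
      let rule := (PySem.Dict.ofList rules).getD p.1 []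
      PySem.Set.union s
        (PySem.Set.union
          (PySem.Set.ofList (PySem.List.pyRange (PySem.List.pyGetD rule 0 0) (PySem.List.pyGetD rule 1 0 + 1) 1))
          (PySem.Set.ofList (PySem.List.pyRange (PySem.List.pyGetD rule 2 0) (PySem.List.pyGetD rule 3 0 + 1) 1))))
    PySem.Set.empty

def quiz_one (rules : List (String × List Int)) (nearby_tickets : List (List Int)) : Int × List (List Int) :=
  let qualified_numbers := pvAqualifiedNumbers rules
  nearby_tickets.foldl
    (fun acc ticket =>
      let inner := ticket.foldl
        (fun st number =>
          if !(PySem.Set.contains qualified_numbers number) then (st.1 + number, false) else st)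
        (acc.1, true)
      (inner.1, if inner.2 then acc.2 ++ [ticket] else acc.2))
    (0, [])

-- ===== PORT B =====
-- the two 'ivs.append((rule[.], rule[.]+1))' lines, looped over rules.values()
def pvBivs (rules : List (String × List Int)) : List (Int × Int) :=
  (PySem.Dict.ofList rules).values.foldl
    (fun acc rule =>
      acc ++ [(PySem.List.pyGetD rule 0 0, PySem.List.pyGetD rule 1 0 + 1),
              (PySem.List.pyGetD rule 2 0, PySem.List.pyGetD rule 3 0 + 1)])
    []

-- one iteration of the 'for a, b in ivs' merge loop (mutating merged[-1] = appending on dropLast)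
def pvBstep (merged : List (Int × Int)) (ab : Int × Int) : List (Int × Int) :=
  if ab.2 ≤ ab.1 then merged
  else
    match merged.getLast? with
    | none => merged ++ [ab]
    | some l =>
      if ab.1 ≤ l.2 then
        (if l.2 < ab.2 then merged.dropLast ++ [(l.1, ab.2)] else merged)
      else merged ++ [ab]

def pvBmerged (rules : List (String × List Int)) : List (Int × Int) :=
  (PySem.List.sorted (pvBivs rules) (fun iv => iv.1) false).foldl pvBstep []

-- the hand-written 'while lo < hi' binary-search loop of ok(n)
def pvBsearch (starts : List Int) (n : Int) (lo hi : Int) : Int :=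
  if h : lo < hi then
    let mid := PySem.Int.floordiv (lo + hi) 2
    if PySem.List.pyGetD starts mid 0 ≤ n then pvBsearch starts n (mid + 1) hi
    else pvBsearch starts n lo mid
  else lo
termination_by (hi - lo).toNat
decreasing_by
  · have h1 : lo ≤ PySem.Int.floordiv (lo + hi) 2 :=
      (PySem.Int.floordiv_two_mid_bounds (le_of_lt h)).1
    omega
  · have h2 : PySem.Int.floordiv (lo + hi) 2 < hi := by
      rw [PySem.Int.floordiv_lt_iff_lt_mul (by omega)]; omega
    omega

def pvBok (merged : List (Int × Int)) (starts : List Int) (n : Int) : Bool :=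
  let lo := pvBsearch starts n 0 (starts.length : Int)
  decide (0 < lo) && decide (n < (PySem.List.pyGetD merged (lo - 1) (0, 0)).2)

def quiz_one_alt (rules : List (String × List Int)) (nearby_tickets : List (List Int)) : Int × List (List Int) :=
  let merged := pvBmerged rules
  let starts := merged.map (fun iv => iv.1)
  nearby_tickets.foldl
    (fun acc ticket =>
      let bad := ticket.filter (fun n => !(pvBok merged starts n))
      (acc.1 + bad.sum, if bad.isEmpty then acc.2 ++ [ticket] else acc.2))
    (0, [])

-- ===== PRECONDITION & SPEC =====
-- Pre_ excludes exactly the inputs where Python A raises IndexError: a rule list surviving in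
-- the dict (last value per key) with fewer than 4 entries, read by rule[0]..rule[3].
def Pre_quiz_one (rules : List (String × List Int)) (nearby_tickets : List (List Int)) : Prop :=
  ∀ p ∈ (PySem.Dict.ofList rules).items, 4 ≤ p.2.length
instance (rules : List (String × List Int)) (nearby_tickets : List (List Int)) : Decidable (Pre_quiz_one rules nearby_tickets) := by unfold Pre_quiz_one; infer_instance

def pvWitness_quiz_one : (List (String × List Int)) × List (List Int) :=
  ([("row", [1, 3, 5, 7])], [[2, 4], [10], [6, 1]])

def Spec_quiz_one (rules : List (String × List Int)) (nearby_tickets : List (List Int)) (out : Int × List (List Int)) : Prop := out = quiz_one_alt rules nearby_tickets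
instance (rules : List (String × List Int)) (nearby_tickets : List (List Int)) (out : Int × List (List Int)) : Decidable (Spec_quiz_one rules nearby_tickets out) := by unfold Spec_quiz_one; infer_instance

-- ===== CLAIM (what is proved, stated in full; the proofs are below) =====
def Claim_equal_quiz_one : Prop := ∀ (rules : List (String × List Int)) (nearby_tickets : List (List Int)), Dom_quiz_one rules nearby_tickets → Pre_quiz_one rules nearby_tickets → Spec_quiz_one rules nearby_tickets (quiz_one rules nearby_tickets)

-- ===== LEMMAS AND PROOFS =====

-- x is qualified by the interval list l
def pvCoveredL (l : List (Int × Int)) (x : Int) : Prop := ∃ ab ∈ l, ab.1 ≤ x ∧ x < ab.2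

-- the merge-loop invariant: nonempty intervals, pairwise separated left to right
def pvGood (l : List (Int × Int)) : Prop :=
  (∀ p ∈ l, p.1 < p.2) ∧ l.Pairwise (fun p q => p.2 < q.1)

theorem pv_covered_nil (x : Int) : pvCoveredL [] x ↔ False := by simp [pvCoveredL]

theorem pv_covered_cons (ab : Int × Int) (l : List (Int × Int)) (x : Int) :
    pvCoveredL (ab :: l) x ↔ (ab.1 ≤ x ∧ x < ab.2) ∨ pvCoveredL l x := by
  unfold pvCoveredL
  constructor
  · rintro ⟨p, hp, h⟩
    rcases List.mem_cons.mp hp with rfl | hp'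
    · exact Or.inl h
    · exact Or.inr ⟨p, hp', h⟩
  · rintro (h | ⟨p, hp, h⟩)
    · exact ⟨ab, List.mem_cons_self, h⟩
    · exact ⟨p, List.mem_cons_of_mem _ hp, h⟩

theorem pv_covered_append (l1 l2 : List (Int × Int)) (x : Int) :
    pvCoveredL (l1 ++ l2) x ↔ pvCoveredL l1 x ∨ pvCoveredL l2 x := by
  unfold pvCoveredL
  constructor
  · rintro ⟨p, hp, h⟩
    rcases List.mem_append.mp hp with h' | h'
    · exact Or.inl ⟨p, h', h⟩
    · exact Or.inr ⟨p, h', h⟩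
  · rintro (⟨p, hp, h⟩ | ⟨p, hp, h⟩)
    · exact ⟨p, List.mem_append.mpr (Or.inl hp), h⟩
    · exact ⟨p, List.mem_append.mpr (Or.inr hp), h⟩

theorem pv_covered_singleton (ab : Int × Int) (x : Int) :
    pvCoveredL [ab] x ↔ (ab.1 ≤ x ∧ x < ab.2) := by
  rw [pv_covered_cons]
  simp [pv_covered_nil]

-- membership through A's fold of range-set unions
theorem pv_mem_foldl_union (r1 r2 : String × List Int → List Int)
    (l : List (String × List Int)) (s : PySem.Set Int) (y : Int) :
    y ∈ l.foldl (fun s p => PySem.Set.union s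
        (PySem.Set.union (PySem.Set.ofList (r1 p)) (PySem.Set.ofList (r2 p)))) s
      ↔ y ∈ s ∨ ∃ p ∈ l, y ∈ r1 p ∨ y ∈ r2 p := by
  induction l generalizing s with
  | nil => simp
  | cons hd tl ih =>
    simp only [List.foldl_cons, ih, PySem.Set.mem_union, PySem.Set.mem_ofList, List.mem_cons]
    aesop

-- A's set membership is coverage by B's raw interval list
theorem pv_mem_iff_covered_ivs (rules : List (String × List Int)) (n : Int) :
    n ∈ pvAqualifiedNumbers rules ↔ pvCoveredL (pvBivs rules) n := by
  have hlookup : ∀ p ∈ (PySem.Dict.ofList rules).items,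
      (PySem.Dict.ofList rules).getD p.1 [] = p.2 := by
    intro p hp
    exact PySem.Dict.getD_of_mem_items (PySem.Dict.ofList rules)
      (by exact hp) (PySem.Dict.nodup_keys_ofList rules) []
  have hA : pvAqualifiedNumbers rules
      = (PySem.Dict.ofList rules).items.foldl
        (fun s p => PySem.Set.union s
          (PySem.Set.union
            (PySem.Set.ofList (PySem.List.pyRange (PySem.List.pyGetD p.2 0 0) (PySem.List.pyGetD p.2 1 0 + 1) 1))
            (PySem.Set.ofList (PySem.List.pyRange (PySem.List.pyGetD p.2 2 0) (PySem.List.pyGetD p.2 3 0 + 1) 1))))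
        PySem.Set.empty := by
    unfold pvAqualifiedNumbers
    apply PySem.List.foldl_congr_mem
    intro acc p hp
    rw [hlookup p hp]
  have hB : pvBivs rules
      = (PySem.Dict.ofList rules).items.flatMap
          (fun p => [(PySem.List.pyGetD p.2 0 0, PySem.List.pyGetD p.2 1 0 + 1),
                     (PySem.List.pyGetD p.2 2 0, PySem.List.pyGetD p.2 3 0 + 1)]) := by
    unfold pvBivs
    rw [show (PySem.Dict.ofList rules).values = (PySem.Dict.ofList rules).items.map (·.2) from rfl,
        List.foldl_map, PySem.List.foldl_append_eq_flatMap
          (fun p : String × List Int => [(PySem.List.pyGetD p.2 0 0, PySem.List.pyGetD p.2 1 0 + 1),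
            (PySem.List.pyGetD p.2 2 0, PySem.List.pyGetD p.2 3 0 + 1)])]
    simp
  rw [hA, hB]
  rw [pv_mem_foldl_union
    (fun p => PySem.List.pyRange (PySem.List.pyGetD p.2 0 0) (PySem.List.pyGetD p.2 1 0 + 1) 1)
    (fun p => PySem.List.pyRange (PySem.List.pyGetD p.2 2 0) (PySem.List.pyGetD p.2 3 0 + 1) 1)]
  simp only [PySem.Set.empty, List.not_mem_nil, false_or]
  unfold pvCoveredL
  constructor
  · rintro ⟨p, hp, h | h⟩
    · exact ⟨_, List.mem_flatMap.mpr ⟨p, hp, List.mem_cons_self⟩, PySem.List.mem_pyRange_one.mp h⟩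
    · exact ⟨_, List.mem_flatMap.mpr ⟨p, hp, List.mem_cons_of_mem _ List.mem_cons_self⟩,
        PySem.List.mem_pyRange_one.mp h⟩
  · rintro ⟨ab, hab, h⟩
    rcases List.mem_flatMap.mp hab with ⟨p, hp, hmem⟩
    rcases List.mem_cons.mp hmem with rfl | hmem'
    · exact ⟨p, hp, Or.inl (PySem.List.mem_pyRange_one.mpr h)⟩
    · rcases List.mem_cons.mp hmem' with rfl | hmem''
      · exact ⟨p, hp, Or.inr (PySem.List.mem_pyRange_one.mpr h)⟩
      · exact absurd hmem'' List.not_mem_nil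

-- the merge loop preserves goodness and exact coverage
theorem pv_merge_invariant (rest : List (Int × Int)) (merged : List (Int × Int))
    (hg : pvGood merged)
    (hsorted : rest.Pairwise (fun p q => p.1 ≤ q.1))
    (hlast : ∀ l ∈ merged.getLast?, ∀ ab ∈ rest, l.1 ≤ ab.1) :
    pvGood (rest.foldl pvBstep merged) ∧
      (∀ x, pvCoveredL (rest.foldl pvBstep merged) x ↔ pvCoveredL merged x ∨ pvCoveredL rest x) := by
  induction rest generalizing merged with
  | nil =>
    refine ⟨hg, fun x => ?_⟩
    rw [List.foldl_nil, pv_covered_nil]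
    tauto
  | cons ab tl ih =>
    rw [List.foldl_cons]
    have hsorted' : tl.Pairwise (fun p q => p.1 ≤ q.1) := (List.pairwise_cons.mp hsorted).2
    have hab_le : ∀ p ∈ tl, ab.1 ≤ p.1 := (List.pairwise_cons.mp hsorted).1
    by_cases hempty : ab.2 ≤ ab.1
    · have hstep : pvBstep merged ab = merged := by simp [pvBstep, hempty]
      rw [hstep]
      have hres := ih merged hg hsorted' (fun l hl p hp => hlast l hl p (List.mem_cons_of_mem _ hp))
      refine ⟨hres.1, fun x => ?_⟩
      rw [hres.2, pv_covered_cons]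
      constructor
      · rintro (h | h)
        · exact Or.inl h
        · exact Or.inr (Or.inr h)
      · rintro (h | (h | h))
        · exact Or.inl h
        · exact absurd h (by omega)
        · exact Or.inr h
    · push_neg at hempty
      rcases hml : merged.getLast? with _ | l
      · -- merged = []
        have hmerged : merged = [] := List.getLast?_eq_none_iff.mp hml
        subst hmerged
        have hstep : pvBstep [] ab = [ab] := by simp [pvBstep, not_le.mpr hempty]
        rw [hstep]
        have hg' : pvGood [ab] := ⟨by simpa using hempty, by simp⟩
        have hlast' : ∀ l ∈ ([ab] : List (Int × Int)).getLast?, ∀ p ∈ tl, l.1 ≤ p.1 := by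
          intro l hl p hp
          simp only [List.getLast?_singleton, Option.mem_def, Option.some.injEq] at hl
          subst hl
          exact hab_le p hp
        have hres := ih [ab] hg' hsorted' hlast'
        refine ⟨hres.1, fun x => ?_⟩
        rw [hres.2, pv_covered_singleton, pv_covered_cons, pv_covered_nil]
        tauto
      · -- merged = ms ++ [l]
        have hmerged : merged = merged.dropLast ++ [l] := by
          rcases List.getLast?_eq_some_iff.mp hml with ⟨ys, hys⟩
          rw [hys]
          simp
        have hl_mem : l ∈ merged := by rw [hmerged]; simp
        have hl_ab : l.1 ≤ ab.1 := hlast l (by simp [hml]) ab List.mem_cons_self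
        have hl_ne : l.1 < l.2 := hg.1 l hl_mem
        have hpw : merged.dropLast.Pairwise (fun p q => p.2 < q.1)
            ∧ ∀ p ∈ merged.dropLast, p.2 < l.1 := by
          have hp2 := hg.2
          rw [hmerged, List.pairwise_append] at hp2
          exact ⟨hp2.1, fun p hp => by simpa using hp2.2.2 p hp⟩
        by_cases hmerge : ab.1 ≤ l.2
        · by_cases hext : l.2 < ab.2
          · -- extend last interval to (l.1, ab.2)
            have hstep : pvBstep merged ab = merged.dropLast ++ [(l.1, ab.2)] := by
              simp [pvBstep, hml, not_le.mpr hempty, hmerge, hext]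
            rw [hstep]
            have hg' : pvGood (merged.dropLast ++ [(l.1, ab.2)]) := by
              constructor
              · intro p hp
                rcases List.mem_append.mp hp with h | h
                · exact hg.1 p (by rw [hmerged]; exact List.mem_append.mpr (Or.inl h))
                · simp only [List.mem_singleton] at h
                  subst h
                  show l.1 < ab.2
                  omega
              · rw [List.pairwise_append]
                exact ⟨hpw.1, by simp, by simpa using hpw.2⟩
            have hlast' : ∀ l' ∈ (merged.dropLast ++ [(l.1, ab.2)]).getLast?, ∀ p ∈ tl, l'.1 ≤ p.1 := by
              intro l' hl' p hp
              rw [List.getLast?_concat] at hl'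
              simp only [Option.mem_def, Option.some.injEq] at hl'
              subst hl'
              exact le_trans hl_ab (hab_le p hp)
            have hres := ih _ hg' hsorted' hlast'
            refine ⟨hres.1, fun x => ?_⟩
            rw [hres.2, pv_covered_cons, pv_covered_append, pv_covered_singleton]
            conv_rhs => rw [hmerged]
            rw [pv_covered_append, pv_covered_singleton]
            constructor
            · rintro ((h | h) | h)
              · exact Or.inl (Or.inl h)
              · by_cases hx : x < l.2
                · exact Or.inl (Or.inr ⟨h.1, hx⟩)
                · exact Or.inr (Or.inl ⟨by omega, h.2⟩)
              · exact Or.inr (Or.inr h)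
            · rintro ((h | h) | (h | h))
              · exact Or.inl (Or.inl h)
              · exact Or.inl (Or.inr ⟨h.1, by omega⟩)
              · exact Or.inl (Or.inr ⟨by omega, h.2⟩)
              · exact Or.inr h
          · -- ab is contained in l: merged unchanged
            push_neg at hext
            have hstep : pvBstep merged ab = merged := by
              simp [pvBstep, hml, not_le.mpr hempty, hmerge, not_lt.mpr hext]
            rw [hstep]
            have hres := ih merged hg hsorted'
              (fun l' hl' p hp => hlast l' hl' p (List.mem_cons_of_mem _ hp))
            refine ⟨hres.1, fun x => ?_⟩
            rw [hres.2, pv_covered_cons]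
            constructor
            · rintro (h | h)
              · exact Or.inl h
              · exact Or.inr (Or.inr h)
            · rintro (h | (h | h))
              · exact Or.inl h
              · exact Or.inl ⟨l, hl_mem, by omega⟩
              · exact Or.inr h
        · -- disjoint: append ab
          push_neg at hmerge
          have hstep : pvBstep merged ab = merged ++ [ab] := by
            simp [pvBstep, hml, not_le.mpr hempty, not_le.mpr hmerge]
          rw [hstep]
          have hg' : pvGood (merged ++ [ab]) := by
            constructor
            · intro p hp
              rcases List.mem_append.mp hp with h | h
              · exact hg.1 p h
              · simp only [List.mem_singleton] at h
                subst h
                omega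
            · rw [List.pairwise_append]
              refine ⟨hg.2, by simp, ?_⟩
              intro p hp q hq
              simp only [List.mem_singleton] at hq
              subst hq
              rcases List.mem_append.mp (hmerged ▸ hp : p ∈ merged.dropLast ++ [l]) with h | h
              · have := hpw.2 p h
                omega
              · simp only [List.mem_singleton] at h
                subst h
                omega
          have hlast' : ∀ l' ∈ (merged ++ [ab]).getLast?, ∀ p ∈ tl, l'.1 ≤ p.1 := by
            intro l' hl' p hp
            rw [List.getLast?_concat] at hl'
            simp only [Option.mem_def, Option.some.injEq] at hl'
            subst hl'
            exact hab_le p hp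
          have hres := ih _ hg' hsorted' hlast'
          refine ⟨hres.1, fun x => ?_⟩
          rw [hres.2, pv_covered_cons, pv_covered_append, pv_covered_singleton]
          tauto

-- the merged interval list is good and covers exactly what the raw intervals cover
theorem pv_merged_spec (rules : List (String × List Int)) :
    pvGood (pvBmerged rules) ∧ (∀ x, pvCoveredL (pvBmerged rules) x ↔ pvCoveredL (pvBivs rules) x) := by
  have hsorted : (PySem.List.sorted (pvBivs rules) (fun iv => iv.1) false).Pairwise
      (fun p q => p.1 ≤ q.1) := PySem.List.sorted_pairwise (pvBivs rules) (fun iv => iv.1)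
  have hres := pv_merge_invariant (PySem.List.sorted (pvBivs rules) (fun iv => iv.1) false) []
    ⟨by simp, by simp⟩ hsorted (by simp)
  refine ⟨hres.1, fun x => ?_⟩
  unfold pvBmerged
  rw [hres.2 x, pv_covered_nil]
  have hperm := PySem.List.sorted_perm (pvBivs rules) (fun iv => iv.1) false
  unfold pvCoveredL
  constructor
  · rintro (h | ⟨ab, hab, h⟩)
    · exact absurd h not_false
    · exact ⟨ab, hperm.mem_iff.mp hab, h⟩
  · rintro ⟨ab, hab, h⟩
    exact Or.inr ⟨ab, hperm.mem_iff.mpr hab, h⟩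

-- unfolding equations for the binary-search loop
theorem pvBsearch_le (starts : List Int) (n lo hi : Int) (h : lo < hi)
    (hc : PySem.List.pyGetD starts (PySem.Int.floordiv (lo + hi) 2) 0 ≤ n) :
    pvBsearch starts n lo hi = pvBsearch starts n (PySem.Int.floordiv (lo + hi) 2 + 1) hi := by
  rw [pvBsearch, dif_pos h]
  exact if_pos hc

theorem pvBsearch_gt (starts : List Int) (n lo hi : Int) (h : lo < hi)
    (hc : ¬ PySem.List.pyGetD starts (PySem.Int.floordiv (lo + hi) 2) 0 ≤ n) :
    pvBsearch starts n lo hi = pvBsearch starts n lo (PySem.Int.floordiv (lo + hi) 2) := by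
  rw [pvBsearch, dif_pos h]
  exact if_neg hc

theorem pvBsearch_stop (starts : List Int) (n lo hi : Int) (h : ¬ lo < hi) :
    pvBsearch starts n lo hi = lo := by
  rw [pvBsearch]
  exact dif_neg h

-- the binary-search loop returns a split point of starts around n
theorem pv_search_spec (starts : List Int) (n : Int)
    (hs : starts.Pairwise (· < ·)) (lo hi : Int)
    (h0 : 0 ≤ lo) (hlh : lo ≤ hi) (hhi : hi ≤ (starts.length : Int))
    (hleft : ∀ j : Int, 0 ≤ j → j < lo → PySem.List.pyGetD starts j 0 ≤ n)
    (hright : ∀ j : Int, hi ≤ j → j < (starts.length : Int) → n < PySem.List.pyGetD starts j 0) :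
    0 ≤ pvBsearch starts n lo hi ∧ pvBsearch starts n lo hi ≤ (starts.length : Int) ∧
      (∀ j : Int, 0 ≤ j → j < pvBsearch starts n lo hi → PySem.List.pyGetD starts j 0 ≤ n) ∧
      (∀ j : Int, pvBsearch starts n lo hi ≤ j → j < (starts.length : Int) →
        n < PySem.List.pyGetD starts j 0) := by
  have hmono : ∀ i j : Int, 0 ≤ i → i ≤ j → j < (starts.length : Int) →
      PySem.List.pyGetD starts i 0 ≤ PySem.List.pyGetD starts j 0 := by
    intro i j hi0 hij hjlen
    rcases eq_or_lt_of_le hij with rfl | hlt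
    · exact le_refl _
    · rw [PySem.List.pyGetD_eq_getElem starts 0 hi0 (by omega), PySem.List.pyGetD_eq_getElem starts 0 (by omega) hjlen]
      have := List.pairwise_iff_getElem.mp hs i.toNat j.toNat (by omega) (by omega) (by omega)
      omega
  revert h0 hlh hhi hleft hright
  induction lo, hi using pvBsearch.induct starts n with
  | case1 lo hi h mid hcmp ih =>
    intro h0 hlh hhi hleft hright
    have hmid1 : lo ≤ PySem.Int.floordiv (lo + hi) 2 :=
      (PySem.Int.floordiv_two_mid_bounds (le_of_lt h)).1
    have hmid2 : PySem.Int.floordiv (lo + hi) 2 < hi := by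
      rw [PySem.Int.floordiv_lt_iff_lt_mul (by omega)]
      omega
    rw [pvBsearch_le starts n lo hi h hcmp]
    exact ih (by omega) (by omega) (by omega)
      (fun j hj0 hj => by
        rcases lt_or_ge j lo with hc | hc
        · exact hleft j hj0 hc
        · exact le_trans (hmono j (PySem.Int.floordiv (lo + hi) 2) hj0 (by omega) (by omega)) hcmp)
      hright
  | case2 lo hi h mid hcmp ih =>
    intro h0 hlh hhi hleft hright
    have hmid1 : lo ≤ PySem.Int.floordiv (lo + hi) 2 :=
      (PySem.Int.floordiv_two_mid_bounds (le_of_lt h)).1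
    have hmid2 : PySem.Int.floordiv (lo + hi) 2 < hi := by
      rw [PySem.Int.floordiv_lt_iff_lt_mul (by omega)]
      omega
    rw [pvBsearch_gt starts n lo hi h hcmp]
    push_neg at hcmp
    exact ih (by omega) (by omega) (by omega) hleft
      (fun j hj hjlen => by
        rcases lt_or_ge j hi with hc | hc
        · exact lt_of_lt_of_le hcmp (hmono (PySem.Int.floordiv (lo + hi) 2) j (by omega) (by omega) hjlen)
        · exact hright j (by omega) hjlen)
  | case3 lo hi h =>
    intro h0 hlh hhi hleft hright
    rw [pvBsearch_stop starts n lo hi h]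
    exact ⟨h0, by omega, hleft, fun j hj hjlen => hright j (by omega) hjlen⟩

-- B's ok test decides coverage by the merged intervals
theorem pv_ok_iff_covered (merged : List (Int × Int)) (n : Int) (hg : pvGood merged) :
    pvBok merged (merged.map (fun iv => iv.1)) n = true ↔ pvCoveredL merged n := by
  set starts := merged.map (fun iv => iv.1) with hstarts
  have hlen : starts.length = merged.length := by simp [hstarts]
  have hs : starts.Pairwise (· < ·) := by
    rw [hstarts, List.pairwise_map]
    refine List.Pairwise.imp_of_mem ?_ hg.2
    intro p q hp _ h
    have := hg.1 p hp
    omega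
  have hspec := pv_search_spec starts n hs 0 (starts.length : Int)
    (le_refl 0) (by omega) (le_refl _) (by omega) (fun j hj hjlen => absurd hjlen (by omega))
  set r := pvBsearch starts n 0 (starts.length : Int) with hr
  obtain ⟨hr0, hrlen, hL, hR⟩ := hspec
  have hstart_get : ∀ j : Int, 0 ≤ j → j < (merged.length : Int) →
      PySem.List.pyGetD starts j 0 = (PySem.List.pyGetD merged j (0, 0)).1 := by
    intro j hj0 hjlen
    rw [PySem.List.pyGetD_eq_getElem starts 0 hj0 (by omega),
      PySem.List.pyGetD_eq_getElem merged (0, 0) hj0 (by omega)]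
    simp [hstarts]
  simp only [pvBok]
  rw [← hr]
  simp only [Bool.and_eq_true, decide_eq_true_eq]
  constructor
  · rintro ⟨hpos, hend⟩
    refine ⟨PySem.List.pyGetD merged (r - 1) (0, 0), ?_, ?_, hend⟩
    · exact PySem.List.pyGetD_mem merged (0, 0) (by constructor <;> omega)
    · rw [← hstart_get (r - 1) (by omega) (by omega)]
      exact hL (r - 1) (by omega) (by omega)
  · rintro ⟨ab, hab, h1, h2⟩
    obtain ⟨j, hjlen, hjget⟩ := List.mem_iff_getElem.mp hab
    have hjlt : (j : Int) < r := by
      by_contra hc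
      push_neg at hc
      have hRj := hR j hc (by omega)
      rw [hstart_get j (by omega) (by omega),
        PySem.List.pyGetD_eq_getElem merged (0, 0) (by omega) (by omega)] at hRj
      simp only [Int.toNat_natCast] at hRj
      rw [hjget] at hRj
      omega
    have hrpos : 0 < r := by omega
    refine ⟨hrpos, ?_⟩
    have hj_eq : (j : Int) = r - 1 := by
      by_contra hne
      have hjlt' : (j : Int) < r - 1 := by omega
      have hpair := List.pairwise_iff_getElem.mp hg.2 j (r - 1).toNat hjlen (by omega) (by omega)
      have hLr := hL (r - 1) (by omega) (by omega)
      rw [hstart_get (r - 1) (by omega) (by omega),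
        PySem.List.pyGetD_eq_getElem merged (0, 0) (by omega) (by omega)] at hLr
      rw [hjget] at hpair
      omega
    rw [← hj_eq, PySem.List.pyGetD_eq_getElem merged (0, 0) (by omega) (by omega)]
    simp only [Int.toNat_natCast]
    rw [hjget]
    exact h2

-- A's membership test equals B's binary-search test
theorem pv_contains_eq_ok (rules : List (String × List Int)) (n : Int) :
    PySem.Set.contains (pvAqualifiedNumbers rules) n
      = pvBok (pvBmerged rules) ((pvBmerged rules).map (fun iv => iv.1)) n := by
  rw [Bool.eq_iff_iff, PySem.Set.contains_iff, pv_mem_iff_covered_ivs,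
    pv_ok_iff_covered _ n (pv_merged_spec rules).1, (pv_merged_spec rules).2 n]

-- A's inner ticket loop computes the sum and emptiness of the bad numbers
theorem pv_inner_loop (c : Int → Bool) (t : List Int) (e : Int) (q : Bool) :
    t.foldl (fun st n => if !(c n) then (st.1 + n, false) else st) (e, q)
      = (e + (t.filter (fun n => !(c n))).sum,
         q && (t.filter (fun n => !(c n))).isEmpty) := by
  induction t generalizing e q with
  | nil => simp
  | cons hd tl ih =>
    rw [List.foldl_cons]
    cases h : c hd with
    | true =>
      rw [show (if (!true) = true then ((e, q).1 + hd, false) else (e, q)) = (e, q) from rfl, ih]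
      simp [h]
    | false =>
      rw [show (if (!false) = true then ((e, q).1 + hd, false) else (e, q)) = (e + hd, false) from rfl, ih]
      simp [h, add_assoc]

-- ===== VERDICT (by name: the statement is the Claim_ definition above) =====
theorem quiz_one_spec : Claim_equal_quiz_one := by
  intro rules nearby_tickets _ _
  unfold Spec_quiz_one quiz_one quiz_one_alt
  have hc : ∀ n, PySem.Set.contains (pvAqualifiedNumbers rules) n
      = pvBok (pvBmerged rules) ((pvBmerged rules).map (fun iv => iv.1)) n :=
    pv_contains_eq_ok rules
  apply PySem.List.foldl_congr_mem
  intro acc ticket _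
  simp only [hc]
  rw [pv_inner_loop (pvBok (pvBmerged rules) ((pvBmerged rules).map (fun iv => iv.1))) ticket acc.1 true]
  simp
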